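-- pv_equiv track=rewrite | github.com/NiceToMeeetU/ToGetReady | Code/leetcode_everyday/0306.py | nextGreaterElement556
-- ===== SOURCE A (Python) =====
-- def nextGreaterElement556(n: int) -> int:
--     """
--     556
--     给你一个正整数 n ，请你找出符合条件的最小整数，其由重新排列 n 中存在的每位数字组成，
--     并且其值大于 n 。如果不存在这样的正整数，则返回 -1 。
--     注意 ，返回的整数应当是一个 32 位整数 ，如果存在满足题意的答案，但不是 32 位整数 ，同样返回 -1 。
--     """
--     s = list(map(int, str(n)))
--     length = len(s)
--     index = length - 2
--     while index >= 0:  # 寻找第一个比后面数字小的数字s[index]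
--         if s[index] < s[index + 1]:
--             break
--         index -= 1
--     if index < 0:  # 如果不存在，则元素按降序排列，返回-1
--         return -1
--     for j in range(length - 1, index, -1):  # 寻找最后一个比s[index]大的数字s[j]
--         if s[j] > s[index]:
--             break
--     s[index], s[j] = s[j], s[index]  # s[j]与s[index]交换，并将s[index+1:]从小到大排序
--     res = int(''.join(map(str, s[:index + 1] + sorted(s[index + 1:]))))
--     return -1 if res > (1 << 31) - 1 else res  # 检查是否越界
-- ===== SOURCE B (Python) =====
-- def nextGreaterElement556(n: int) -> int:
--     def nxt(ds):
--         # smallest permutation of ds strictly greater than ds, or None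
--         if len(ds) <= 1:
--             return None
--         head, rest = ds[0], ds[1:]
--         t = nxt(rest)
--         if t is not None:
--             return [head] + t
--         bigger = [x for x in rest if x > head]
--         if not bigger:
--             return None
--         m = min(bigger)
--         remaining = sorted(rest)
--         remaining.remove(m)
--         return [m] + sorted(remaining + [head])
--     ds = [int(c) for c in str(n)]
--     r = nxt(ds)
--     if r is None:
--         return -1
--     res = int(''.join(map(str, r)))
--     return -1 if res > (1 << 31) - 1 else res
-- ===== Notes on version B (the rewrite author's own statement) =====
-- stated objective: alternative
-- what changed: Replaces A's in-place index loops (find pivot from the right, swap with the last larger digit, sort the suffix) by a structural recursion on the digit list: take the next permutation of the tail if one exists, otherwise move the smallest strictly larger tail digit to the front and sort the rest.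
-- outside the precondition, e.g. on nextGreaterElement556(-21): A raises ValueError, B raises ValueError
import Mathlib
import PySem

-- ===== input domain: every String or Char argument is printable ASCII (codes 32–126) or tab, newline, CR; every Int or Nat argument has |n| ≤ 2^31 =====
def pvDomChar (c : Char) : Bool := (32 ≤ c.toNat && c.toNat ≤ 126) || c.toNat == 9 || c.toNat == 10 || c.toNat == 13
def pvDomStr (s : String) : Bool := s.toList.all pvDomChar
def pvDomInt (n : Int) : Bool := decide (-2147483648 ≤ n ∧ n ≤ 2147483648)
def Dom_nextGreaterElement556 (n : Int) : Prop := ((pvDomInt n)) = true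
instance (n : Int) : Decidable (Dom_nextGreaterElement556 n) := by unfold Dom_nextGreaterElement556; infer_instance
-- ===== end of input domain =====

-- B re-implements A's in-place pivot/swap/sort next-permutation as a structural recursion on the
-- digit list (next permutation of the tail, else smallest larger digit to the front); objective:
-- alternative decomposition, same cost.

-- ===== PORT A =====
-- 'int(c)' on a digit character of str(n) is c - '0'; exact for n ≥ 0 (Pre_).
def pvDigits (n : Int) : List Int :=
  (PySem.Int.toChars n).map (fun c => ((c.toNat : Int) - 48))

-- res = int(''.join(map(str, ds))); int() never raises here (ds are digits, nonempty), so getD.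
def pvJoin (ds : List Int) : Int :=
  (PySem.Int.ofChars? (ds.map PySem.Int.toChars).flatten).getD 0

-- A's 'while index >= 0: if s[index] < s[index+1]: break; index -= 1' followed by the
-- 'if index < 0: return -1' test: pivotAux s k scans indices k-1, k-2, …, 0; none = fell below 0.
def pivotAux (s : List Int) : Nat → Option Nat
  | 0 => none
  | k + 1 => if s.getD k 0 < s.getD (k + 1) 0 then some k else pivotAux s k

-- A's 'for j in range(length-1, index, -1): if s[j] > s[index]: break' (the break always fires
-- before the range is exhausted, since s[index] < s[index+1]).
def jAux (s : List Int) (pv : Int) : Nat → Nat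
  | 0 => 0
  | j + 1 => if s.getD (j + 1) 0 > pv then j + 1 else jAux s pv j

def nextGreaterElement556 (n : Int) : Int :=
  let s := pvDigits n
  let length := s.length
  match pivotAux s (length - 1) with
  | none => -1
  | some index =>
    let j := jAux s (s.getD index 0) (length - 1)
    let s' := (s.set index (s.getD j 0)).set j (s.getD index 0)
    let res := pvJoin (s'.take (index + 1) ++ PySem.List.sorted (s'.drop (index + 1)) (fun x => x) false)
    if res > 2 ^ 31 - 1 then -1 else res

-- ===== PORT B =====
-- B's recursive helper nxt(ds): next permutation of the tail if it exists, otherwise move the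
-- smallest strictly larger digit of the tail to the front and sort the rest.
def nxtB : List Int → Option (List Int)
  | [] => none
  | [_] => none
  | head :: rest =>
    match nxtB rest with
    | some t => some (head :: t)
    | none =>
      let bigger := rest.filter (fun x => decide (head < x))
      if bigger.isEmpty then none
      else
        let m := (PySem.List.min? bigger (fun x => x)).getD 0
        let remaining := (PySem.List.remove? (PySem.List.sorted rest (fun x => x) false) m).getD []
        some (m :: PySem.List.sorted (remaining ++ [head]) (fun x => x) false)

def nextGreaterElement556_alt (n : Int) : Int :=
  let ds := pvDigits n
  match nxtB ds with
  | none => -1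
  | some r =>
    let res := pvJoin r
    if res > 2 ^ 31 - 1 then -1 else res

-- ===== PRECONDITION & SPEC =====
-- Pre_ excludes negative arguments, on which Python A (and B) raise ValueError (int of the '-' sign character while mapping int over str(n)).
def Pre_nextGreaterElement556 (n : Int) : Prop := 0 ≤ n
instance (n : Int) : Decidable (Pre_nextGreaterElement556 n) := by unfold Pre_nextGreaterElement556; infer_instance
def pvWitness_nextGreaterElement556 : Int := 12

def Spec_nextGreaterElement556 (n : Int) (out : Int) : Prop := out = nextGreaterElement556_alt n
instance (n : Int) (out : Int) : Decidable (Spec_nextGreaterElement556 n out) := by unfold Spec_nextGreaterElement556; infer_instance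

-- ===== CLAIM (what is proved, stated in full; the proofs are below) =====
def Claim_equal_nextGreaterElement556 : Prop := ∀ (n : Int), Dom_nextGreaterElement556 n → Pre_nextGreaterElement556 n → Spec_nextGreaterElement556 n (nextGreaterElement556 n)

-- ===== LEMMAS AND PROOFS =====

-- A's transform on an arbitrary digit list, as an Option (none = the '-1' branch).
def atransform (s : List Int) : Option (List Int) :=
  match pivotAux s (s.length - 1) with
  | none => none
  | some index =>
    let j := jAux s (s.getD index 0) (s.length - 1)
    let s' := (s.set index (s.getD j 0)).set j (s.getD index 0)
    some (s'.take (index + 1) ++ PySem.List.sorted (s'.drop (index + 1)) (fun x => x) false)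

theorem pivot_shift (d : Int) (rest : List Int) :
    ∀ k, pivotAux (d :: rest) (k + 1) =
      match pivotAux rest k with
      | some i => some (i + 1)
      | none => if d < rest.getD 0 0 then some 0 else none := by
  intro k
  induction k with
  | zero => simp [pivotAux]
  | succ k ih =>
    show (if (d :: rest).getD (k+1) 0 < (d :: rest).getD (k+2) 0 then some (k+1) else pivotAux (d :: rest) (k+1)) = _
    rw [List.getD_cons_succ, List.getD_cons_succ, ih]
    show _ = (match (if rest.getD k 0 < rest.getD (k+1) 0 then some k else pivotAux rest k) with
      | some i => some (i + 1)
      | none => if d < rest.getD 0 0 then some 0 else none)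
    split_ifs with h <;> cases hp : pivotAux rest k <;> simp

theorem pivot_some_spec (xs : List Int) :
    ∀ m k, pivotAux xs m = some k → k + 1 ≤ m ∧ xs.getD k 0 < xs.getD (k + 1) 0 := by
  intro m
  induction m with
  | zero => intro k h; simp [pivotAux] at h
  | succ m ih =>
    intro k h
    unfold pivotAux at h
    split_ifs at h with hc
    · cases h; exact ⟨Nat.le_refl _, hc⟩
    · obtain ⟨h1, h2⟩ := ih k h; exact ⟨Nat.le_succ_of_le h1, h2⟩

theorem pivot_none_desc (xs : List Int) :
    ∀ m, pivotAux xs m = none → ∀ i, i < m → xs.getD (i + 1) 0 ≤ xs.getD i 0 := by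
  intro m
  induction m with
  | zero => intro _ i h; omega
  | succ m ih =>
    intro h i hi
    unfold pivotAux at h
    split_ifs at h with hc
    rcases Nat.lt_succ_iff_lt_or_eq.mp hi with h' | h'
    · exact ih h i h'
    · subst h'; omega

theorem jAux_shift (d pv : Int) (rest : List Int) :
    ∀ j, (∃ i, i ≤ j ∧ pv < rest.getD i 0) →
      jAux (d :: rest) pv (j + 1) = jAux rest pv j + 1 := by
  intro j
  induction j with
  | zero =>
    rintro ⟨i, hi, hlt⟩
    interval_cases i
    show (if (d :: rest).getD 1 0 > pv then 1 else jAux (d :: rest) pv 0) = jAux rest pv 0 + 1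
    rw [List.getD_cons_succ, if_pos hlt]
    rfl
  | succ j ih =>
    rintro ⟨i, hi, hlt⟩
    show (if (d :: rest).getD (j+2) 0 > pv then (j+2) else jAux (d :: rest) pv (j+1)) = _
    rw [List.getD_cons_succ]
    show _ = (if rest.getD (j+1) 0 > pv then (j+1) else jAux rest pv j) + 1
    split_ifs with h
    · rfl
    · refine ih ⟨i, ?_, hlt⟩
      rcases Nat.lt_succ_iff_lt_or_eq.mp (Nat.lt_succ_of_le hi) with h' | h'
      · omega
      · subst h'; exact absurd hlt h

theorem jAux_spec (xs : List Int) (pv : Int) :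
    ∀ m, jAux xs pv m ≤ m ∧ (pv < xs.getD (jAux xs pv m) 0 ∨ jAux xs pv m = 0) ∧
      ∀ i, jAux xs pv m < i → i ≤ m → xs.getD i 0 ≤ pv := by
  intro m
  induction m with
  | zero => exact ⟨Nat.le_refl _, Or.inr rfl, by omega⟩
  | succ m ih =>
    unfold jAux
    split_ifs with hc
    · exact ⟨Nat.le_refl _, Or.inl hc, by omega⟩
    · obtain ⟨h1, h2, h3⟩ := ih
      refine ⟨Nat.le_succ_of_le h1, h2, ?_⟩
      intro i hgt hle
      rcases Nat.lt_succ_iff_lt_or_eq.mp (Nat.lt_succ_of_le hle) with h'|h'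
      · exact h3 i hgt (by omega)
      · subst h'; omega

theorem desc_mono (xs : List Int) (h : ∀ i, i + 1 < xs.length → xs.getD (i + 1) 0 ≤ xs.getD i 0) :
    ∀ i j, i ≤ j → j < xs.length → xs.getD j 0 ≤ xs.getD i 0 := by
  intro i j
  induction j with
  | zero => intro hij _; interval_cases i; exact le_refl _
  | succ j ih =>
    intro hij hj
    rcases Nat.lt_succ_iff_lt_or_eq.mp (Nat.lt_succ_of_le hij) with h' | h'
    · exact le_trans (h j hj) (ih (by omega) (by omega))
    · subst h'; exact le_refl _

theorem set_perm_erase (rest : List Int) (jr : Nat) (h : jr < rest.length) (d : Int) :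
    (rest.set jr d).Perm ((rest.erase (rest.getD jr 0)) ++ [d]) := by
  have hget : rest.getD jr 0 = rest[jr] := List.getD_eq_getElem rest 0 h
  have e1 : rest = rest.take jr ++ rest[jr] :: rest.drop (jr + 1) := by
    conv_lhs => rw [← List.take_append_drop jr rest]
    rw [List.drop_eq_getElem_cons h]
  have e2 : rest.set jr d = rest.take jr ++ d :: rest.drop (jr + 1) :=
    List.set_eq_take_cons_drop d h
  have hmem : rest[jr] ∈ rest := List.getElem_mem h
  have he : rest.erase rest[jr] |>.Perm (rest.take jr ++ rest.drop (jr + 1)) := by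
    have h1 : rest.Perm (rest[jr] :: rest.erase rest[jr]) := List.perm_cons_erase hmem
    have h2 : rest.Perm (rest[jr] :: (rest.take jr ++ rest.drop (jr + 1))) := by
      conv_lhs => rw [e1]
      exact List.perm_middle
    exact (h1.symm.trans h2).cons_inv
  rw [hget, e2]
  exact List.perm_middle.trans ((he.symm.cons d).trans (List.perm_append_singleton d _).symm)

theorem atransform_eq_nxtB : ∀ s : List Int, atransform s = nxtB s := by
  intro s
  induction s with
  | nil => rfl
  | cons d rest ih =>
    cases rest with
    | nil => rfl
    | cons e rest' =>
      have hlen : (d :: e :: rest').length - 1 = rest'.length + 1 := by simp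
      have hlen' : (e :: rest').length - 1 = rest'.length := by simp
      unfold atransform
      rw [hlen, pivot_shift]
      cases hp : pivotAux (e :: rest') rest'.length with
      | some k =>
        -- pivot inside the tail: A's swap and sort happen wholly inside the tail
        obtain ⟨hk1, hk2⟩ := pivot_some_spec (e :: rest') rest'.length k hp
        -- unfold atransform of the tail using hp
        have ihr : nxtB (e :: rest') =
            some (let j := jAux (e :: rest') ((e :: rest').getD k 0) rest'.length
                  let s' := ((e :: rest').set k ((e :: rest').getD j 0)).set j ((e :: rest').getD k 0)
                  s'.take (k + 1) ++ PySem.List.sorted (s'.drop (k + 1)) (fun x => x) false) := by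
          rw [← ih]; unfold atransform; rw [hlen', hp]
        have hj : jAux (d :: e :: rest') ((e :: rest').getD k 0) (rest'.length + 1) =
            jAux (e :: rest') ((e :: rest').getD k 0) rest'.length + 1 :=
          jAux_shift d _ _ rest'.length ⟨k + 1, hk1, hk2⟩
        simp only []
        rw [List.getD_cons_succ, hj]
        show some _ = nxtB (d :: e :: rest')
        rw [show nxtB (d :: e :: rest') = match nxtB (e :: rest') with
          | some t => some (d :: t)
          | none =>
            let bigger := (e :: rest').filter (fun x => decide (d < x))
            if bigger.isEmpty then none
            else
              let m := (PySem.List.min? bigger (fun x => x)).getD 0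
              let remaining := (PySem.List.remove? (PySem.List.sorted (e :: rest') (fun x => x) false) m).getD []
              some (m :: PySem.List.sorted (remaining ++ [d]) (fun x => x) false) from rfl]
        rw [ihr]
        simp only [List.set_cons_succ, List.getD_cons_succ, List.take_succ_cons, List.drop_succ_cons, List.cons_append]
      | none =>
        have ihr : nxtB (e :: rest') = none := by
          rw [← ih]; unfold atransform; rw [hlen', hp]
        have hdesc : ∀ i, i + 1 < (e :: rest').length →
            (e :: rest').getD (i + 1) 0 ≤ (e :: rest').getD i 0 := by
          intro i hi
          exact pivot_none_desc (e :: rest') rest'.length hp i (by simpa using hi)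
        have hmono := desc_mono (e :: rest') hdesc
        rw [show nxtB (d :: e :: rest') = match nxtB (e :: rest') with
          | some t => some (d :: t)
          | none =>
            let bigger := (e :: rest').filter (fun x => decide (d < x))
            if bigger.isEmpty then none
            else
              let m := (PySem.List.min? bigger (fun x => x)).getD 0
              let remaining := (PySem.List.remove? (PySem.List.sorted (e :: rest') (fun x => x) false) m).getD []
              some (m :: PySem.List.sorted (remaining ++ [d]) (fun x => x) false) from rfl]
        rw [ihr]
        by_cases hd : d < (e :: rest').getD 0 0
        · -- pivot is position 0: the head is swapped with the smallest larger tail digit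
          rw [if_pos hd]
          have hbig : ((e :: rest').filter (fun x => decide (d < x))).isEmpty = false := by
            rw [List.isEmpty_eq_false_iff]
            intro hnil
            have : e ∈ (e :: rest').filter (fun x => decide (d < x)) :=
              List.mem_filter.mpr ⟨List.mem_cons_self, by simpa using hd⟩
            rw [hnil] at this; exact List.not_mem_nil this
          obtain ⟨hjr1, hjr2, hjr3⟩ := jAux_spec (e :: rest') d rest'.length
          set jr := jAux (e :: rest') d rest'.length with hjrdef
          have hj : jAux (d :: e :: rest') d (rest'.length + 1) = jr + 1 :=
            jAux_shift d d (e :: rest') rest'.length ⟨0, Nat.zero_le _, hd⟩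
          have hjrlen : jr < (e :: rest').length := by simp; omega
          have hgt : d < (e :: rest').getD jr 0 := by
            rcases hjr2 with h | h
            · exact h
            · rw [h]; exact hd
          cases hm : PySem.List.min? ((e :: rest').filter (fun x => decide (d < x))) (fun x => x) with
          | none =>
            exfalso
            rw [PySem.List.min?_eq_none_iff] at hm
            rw [hm] at hbig
            simp at hbig
          | some mB =>
            have hmemB := PySem.List.min?_mem hm
            have hmin := PySem.List.min?_isMin hm
            obtain ⟨hmemrest, hdm⟩ := List.mem_filter.mp hmemB
            have hdm' : d < mB := by simpa using hdm
            have hjmem : (e :: rest').getD jr 0 ∈ (e :: rest').filter (fun x => decide (d < x)) := by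
              refine List.mem_filter.mpr ⟨?_, by simpa using hgt⟩
              rw [List.getD_eq_getElem _ _ hjrlen]
              exact List.getElem_mem hjrlen
            have hle1 : mB ≤ (e :: rest').getD jr 0 := hmin _ hjmem
            have hle2 : (e :: rest').getD jr 0 ≤ mB := by
              obtain ⟨i, hi, hxi⟩ := List.mem_iff_getElem.mp hmemrest
              have hgi : (e :: rest').getD i 0 = mB := by
                rw [List.getD_eq_getElem _ _ hi, hxi]
              have hij : i ≤ jr := by
                by_contra hcon
                have := hjr3 i (by omega) (by simp at hi; omega)
                omega
              have := hmono i jr hij hjrlen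
              omega
            have hmeq : (e :: rest').getD jr 0 = mB := le_antisymm hle2 hle1
            have hremove : PySem.List.remove? (PySem.List.sorted (e :: rest') (fun x => x) false) mB =
                some ((PySem.List.sorted (e :: rest') (fun x => x) false).erase mB) :=
              PySem.List.remove?_eq_some_erase _ mB ((PySem.List.mem_sorted _ _ _ _).mpr hmemrest)
            have hperm : ((PySem.List.sorted (e :: rest') (fun x => x) false).erase mB ++ [d]).Perm
                ((e :: rest').set jr d) := by
              have h1 : ((PySem.List.sorted (e :: rest') (fun x => x) false).erase mB).Perm
                  ((e :: rest').erase mB) :=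
                (PySem.List.sorted_perm (e :: rest') (fun x => x) false).erase mB
              refine ((h1.append_right [d]).trans ?_)
              rw [← hmeq]
              exact (set_perm_erase (e :: rest') jr hjrlen d).symm
            have hsort : PySem.List.sorted ((PySem.List.sorted (e :: rest') (fun x => x) false).erase mB ++ [d]) (fun x => x) false =
                PySem.List.sorted ((e :: rest').set jr d) (fun x => x) false :=
              PySem.List.sorted_eq_sorted_of_perm _ _ _ (fun a b hab => hab) hperm
            simp only []
            rw [List.getD_cons_zero, hbig, hm]
            simp only [Bool.false_eq_true, if_false, Option.getD_some]
            rw [hremove]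
            simp only [Option.getD_some]
            rw [hj, List.getD_cons_succ, List.set_cons_zero, List.set_cons_succ,
              List.take_succ_cons, List.take_zero, List.drop_succ_cons, List.drop_zero,
              hsort, List.singleton_append, hmeq]
        · rw [if_neg hd]
          have hbig : ((e :: rest').filter (fun x => decide (d < x))).isEmpty = true := by
            rw [List.isEmpty_iff, List.filter_eq_nil_iff]
            intro x hx
            obtain ⟨i, hi, hxi⟩ := List.mem_iff_getElem.mp hx
            have hxd : (e :: rest').getD i 0 = x := by
              rw [List.getD_eq_getElem _ _ hi, hxi]
            have := hmono 0 i (Nat.zero_le i) hi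
            simp only [decide_eq_true_eq]
            omega
          simp only []
          rw [hbig]
          rfl

-- ===== VERDICT (by name: the statement is the Claim_ definition above) =====
theorem nextGreaterElement556_spec : Claim_equal_nextGreaterElement556 := by
  intro n _ _
  unfold Spec_nextGreaterElement556 nextGreaterElement556 nextGreaterElement556_alt
  have key := atransform_eq_nxtB (pvDigits n)
  unfold atransform at key
  dsimp only
  rw [← key]
  cases pivotAux (pvDigits n) ((pvDigits n).length - 1) <;> simp
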